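-- pv_equiv track=rewrite | github.com/Cirrinci/symbolica-feynman-rules | viz/tools/generate_model_diagrams_v2.py | neighborhood_subgraph
-- ===== SOURCE A (Python) =====
-- from collections import deque
-- from typing import Dict, Iterable, List, Optional, Set, Tuple
--
-- def reverse_edges(edges: Dict[str, Set[str]]) -> Dict[str, Set[str]]:
--     rev: Dict[str, Set[str]] = {name: set() for name in edges}
--     for src, targets in edges.items():
--         rev.setdefault(src, set())
--         for dst in targets:
--             rev.setdefault(dst, set()).add(src)
--     return rev
--
-- def neighborhood_subgraph(edges: Dict[str, Set[str]], center: str, depth: int) -> Dict[str, Set[str]]: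
--     rev = reverse_edges(edges)
--     visited: Set[str] = {center}
--     queue = deque([(center, 0)])
--
--     while queue:
--         node, d = queue.popleft()
--         if d >= depth:
--             continue
--         neighbors = set(edges.get(node, set())) | set(rev.get(node, set()))
--         for nxt in neighbors:
--             if nxt not in visited:
--                 visited.add(nxt)
--                 queue.append((nxt, d + 1))
--
--     return {n: {t for t in edges.get(n, set()) if t in visited} for n in visited}
-- ===== SOURCE B (Python) =====
-- def neighborhood_subgraph(edges, center, depth):
--     # No reverse/adjacency map is ever materialized: undirected neighbors are
--     # discovered on demand by scanning the edge dict for each expanded node.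
--     def undirected_neighbors(n):
--         nbrs = set(edges.get(n, set()))
--         for u, targets in edges.items():
--             if n in targets:
--                 nbrs.add(u)
--         return nbrs
--
--     visited = {center}
--     layer = [center]
--     remaining = depth
--     while layer and remaining > 0:
--         nxt = []
--         for n in layer:
--             for t in undirected_neighbors(n):
--                 if t not in visited:
--                     visited.add(t)
--                     nxt.append(t)
--         layer = nxt
--         remaining -= 1
--
--     return {n: set(edges.get(n, set())) & visited for n in visited}
-- ===== Notes on version B (the rewrite author's own statement) =====
-- stated objective: alternative
-- what changed: A preprocesses the whole graph into a reverse-edge dict and runs a deque BFS tagging every node with its depth; B builds no reverse or adjacency index at all - each expanded node finds its undirected neighbors by scanning the raw edge dict on demand, expands level by level counting the remaining depth down, and induces the subgraph by set intersection instead of a filtering comprehension.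
import Mathlib
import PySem

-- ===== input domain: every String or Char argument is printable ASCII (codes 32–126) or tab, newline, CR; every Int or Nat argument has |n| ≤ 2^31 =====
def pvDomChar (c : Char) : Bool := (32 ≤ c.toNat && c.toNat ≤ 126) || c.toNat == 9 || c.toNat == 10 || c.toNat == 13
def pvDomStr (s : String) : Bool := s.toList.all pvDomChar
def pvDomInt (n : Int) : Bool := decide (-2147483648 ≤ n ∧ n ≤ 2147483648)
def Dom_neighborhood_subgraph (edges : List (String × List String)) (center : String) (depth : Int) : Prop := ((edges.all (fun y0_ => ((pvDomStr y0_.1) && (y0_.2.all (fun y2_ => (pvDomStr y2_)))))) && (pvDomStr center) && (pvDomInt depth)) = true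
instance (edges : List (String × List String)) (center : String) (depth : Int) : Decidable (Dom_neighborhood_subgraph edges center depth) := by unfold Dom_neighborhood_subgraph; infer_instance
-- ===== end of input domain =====

-- B builds no reverse/adjacency index at all: it finds each node's undirected neighbors by
-- scanning the raw edge dict on demand, expands level by level counting remaining depth down,
-- and induces the subgraph by set intersection (objective: alternative; return value only —
-- neither version mutates its arguments).

-- ===== PORT A =====

-- reverse_edges: rev = {name: set() for name in edges}; then setdefault(src)/setdefault(dst).add(src).
def pvRevEdges (edges : List (String × List String)) : PySem.Dict String (List String) :=
  let rev0 : PySem.Dict String (List String) :=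
    edges.foldl (fun r p => r.insert p.1 ([] : List String)) PySem.Dict.empty
  edges.foldl (fun r p =>
    let r1 := r.setdefault p.1 ([] : List String)
    p.2.foldl (fun r dst =>
      let r2 := r.setdefault dst ([] : List String)
      r2.insert dst (PySem.Set.add (r2.getD dst []) p.1)) r1) rev0

-- measure for A's while-loop: queue length + twice the universe elements not yet visited
def pvMeas (univ : List String) (q : List (String × Int)) (vis : PySem.Set String) : Nat :=
  q.length + 2 * univ.countP (fun x => !PySem.Set.contains vis x)

-- universe of all values stored in the two dicts (everything A can ever push on the queue)
def pvUniv (ed rev : PySem.Dict String (List String)) : List String :=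
  ed.items.flatMap Prod.snd ++ rev.items.flatMap Prod.snd

lemma pvCountP_lt {α : Type} (P Q : α → Bool) (hPQ : ∀ y, P y = true → Q y = true)
    (x : α) (hPx : P x = false) (hQx : Q x = true) :
    ∀ l : List α, x ∈ l → l.countP P + 1 ≤ l.countP Q := by
  intro l hx
  induction l with
  | nil => simp at hx
  | cons a l ih =>
    simp only [List.countP_cons]
    by_cases hax : x = a
    · subst hax
      have hmono := List.countP_mono_left (l := l) (p := P) (q := Q) (fun y _ => hPQ y)
      simp [hPx, hQx]; omega
    · have hxl : x ∈ l := by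
        rcases List.mem_cons.1 hx with h | h
        · exact absurd h hax
        · exact h
      have hle := ih hxl
      by_cases hPa : P a = true
      · have hQa := hPQ a hPa
        simp [hPa, hQa]; omega
      · have hPa' : P a = false := by simpa using hPa
        cases hQa : Q a <;> simp [hPa'] <;> omega

lemma pvCountP_drop (univ : List String) (vis : PySem.Set String) (x : String)
    (hx : x ∈ univ) (hv : PySem.Set.contains vis x = false) :
    univ.countP (fun y => !PySem.Set.contains (PySem.Set.add vis x) y) + 1 ≤
      univ.countP (fun y => !PySem.Set.contains vis y) := by
  have hxv : x ∉ vis := by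
    simpa [PySem.Set.contains, List.contains_eq_mem] using hv
  have hadd : PySem.Set.add vis x = vis ++ [x] := PySem.Set.add_of_not_mem hxv
  refine pvCountP_lt _ _ ?_ x ?_ ?_ univ hx
  · intro y hy
    simp only [hadd, PySem.Set.contains, List.contains_eq_mem, List.mem_append,
      Bool.not_eq_true', decide_eq_false_iff_not] at hy ⊢
    intro hmem; exact hy (Or.inl hmem)
  · simp [hadd, PySem.Set.contains, List.contains_eq_mem]
  · simpa [PySem.Set.contains, List.contains_eq_mem] using hxv

-- processing one node's neighbour set can only lower the measure
lemma pvFoldMeas (univ : List String) (d : Int) (ns : List String) :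
    ∀ (vis : PySem.Set String) (q : List (String × Int)),
    (∀ x ∈ ns, x ∈ univ) →
    pvMeas univ
      ((ns.foldl (fun (s : PySem.Set String × List (String × Int)) x =>
          if s.1.contains x then s else (PySem.Set.add s.1 x, s.2 ++ [(x, d)])) (vis, q)).2)
      ((ns.foldl (fun (s : PySem.Set String × List (String × Int)) x =>
          if s.1.contains x then s else (PySem.Set.add s.1 x, s.2 ++ [(x, d)])) (vis, q)).1)
      ≤ pvMeas univ q vis := by
  induction ns with
  | nil => intro vis q _; simp
  | cons x l ih =>
    intro vis q hmem
    simp only [List.foldl_cons]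
    by_cases hc : PySem.Set.contains vis x = true
    · rw [if_pos hc]
      exact ih vis q (fun y hy => hmem y (List.mem_cons_of_mem _ hy))
    · have hc' : PySem.Set.contains vis x = false := by simpa using hc
      rw [if_neg hc]
      have h1 := ih (PySem.Set.add vis x) (q ++ [(x, d)])
        (fun y hy => hmem y (List.mem_cons_of_mem _ hy))
      have h2 := pvCountP_drop univ vis x (hmem x (List.mem_cons_self)) hc'
      unfold pvMeas at *
      simp only [List.length_append, List.length_cons, List.length_nil] at *
      omega

lemma pvMem_getD_values (d : PySem.Dict String (List String)) (n x : String)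
    (hx : x ∈ d.getD n []) : x ∈ d.items.flatMap Prod.snd := by
  unfold PySem.Dict.getD PySem.Dict.get? at hx
  cases hfind : List.find? (fun p => p.1 == n) d.items with
  | none => rw [hfind] at hx; simp at hx
  | some p =>
    rw [hfind] at hx
    simp only [Option.map_some, Option.getD_some] at hx
    exact List.mem_flatMap.2 ⟨p, List.mem_of_find?_eq_some hfind, hx⟩

lemma pvMem_union_univ (ed rev : PySem.Dict String (List String)) (n x : String)
    (hx : x ∈ PySem.Set.union (PySem.Set.ofList (ed.getD n []))
            (PySem.Set.ofList (rev.getD n []))) : x ∈ pvUniv ed rev := by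
  rcases (PySem.Set.mem_union _ _ _).1 hx with h | h
  · exact List.mem_append_left _ (pvMem_getD_values ed n x ((PySem.Set.mem_ofList _ _).1 h))
  · exact List.mem_append_right _ (pvMem_getD_values rev n x ((PySem.Set.mem_ofList _ _).1 h))

-- the while-loop of A
def pvLoopA (ed rev : PySem.Dict String (List String)) (depth : Int)
    (queue : List (String × Int)) (vis : PySem.Set String) : PySem.Set String :=
  match queue with
  | [] => vis
  | (node, d) :: rest =>
    if depth ≤ d then pvLoopA ed rev depth rest vis
    else
      let nbrs := PySem.Set.union (PySem.Set.ofList (ed.getD node []))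
                    (PySem.Set.ofList (rev.getD node []))
      let st := nbrs.foldl (fun (s : PySem.Set String × List (String × Int)) x =>
          if s.1.contains x then s else (PySem.Set.add s.1 x, s.2 ++ [(x, d + 1)])) (vis, rest)
      pvLoopA ed rev depth st.2 st.1
termination_by pvMeas (pvUniv ed rev) queue vis
decreasing_by
  · unfold pvMeas; simp
  · have h := pvFoldMeas (pvUniv ed rev) (d + 1)
      (PySem.Set.union (PySem.Set.ofList (ed.getD node []))
        (PySem.Set.ofList (rev.getD node []))) vis rest
      (fun x hx => pvMem_union_univ ed rev node x hx)
    unfold pvMeas at *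
    simp only [dite_eq_ite, List.length_cons] at *
    omega

def neighborhood_subgraph (edges : List (String × List String)) (center : String) (depth : Int) : List (String × List String) :=
  let ed : PySem.Dict String (List String) := ⟨edges⟩
  let rev := pvRevEdges edges
  let visited := pvLoopA ed rev depth [(center, 0)] [center]
  (visited.foldl (fun (d : PySem.Dict String (List String)) n =>
      d.insert n (PySem.Set.ofList ((ed.getD n []).filter (fun t => PySem.Set.contains visited t))))
    PySem.Dict.empty).items

-- ===== PORT B =====

-- undirected_neighbors(n): nbrs = set(edges.get(n, set())); scan edges.items(), add u when n in targets
def pvUndirNbrs (edges : List (String × List String)) (n : String) : PySem.Set String :=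
  edges.foldl (fun nbrs p => if n ∈ p.2 then PySem.Set.add nbrs p.1 else nbrs)
    (PySem.Set.ofList ((PySem.Dict.mk edges).getD n []))

-- while layer and remaining > 0: expand each layer node's on-demand neighbor scan
def pvLoopB (edges : List (String × List String)) (vis : PySem.Set String)
    (layer : List String) (remaining : Int) : PySem.Set String :=
  if layer = [] ∨ remaining ≤ 0 then vis
  else
    let st := layer.foldl (fun (s : PySem.Set String × List String) n =>
        (pvUndirNbrs edges n).foldl (fun (s : PySem.Set String × List String) t =>
          if s.1.contains t then s else (PySem.Set.add s.1 t, s.2 ++ [t])) s) (vis, [])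
    pvLoopB edges st.1 st.2 (remaining - 1)
termination_by remaining.toNat
decreasing_by
  simp only [not_or, not_le] at *
  omega

def neighborhood_subgraph_alt (edges : List (String × List String)) (center : String) (depth : Int) : List (String × List String) :=
  let ed : PySem.Dict String (List String) := ⟨edges⟩
  let visited := pvLoopB edges [center] [center] depth
  (visited.foldl (fun (d : PySem.Dict String (List String)) n =>
      d.insert n (PySem.Set.inter (PySem.Set.ofList (ed.getD n [])) visited))
    PySem.Dict.empty).items

-- ===== PRECONDITION & SPEC =====
def Spec_neighborhood_subgraph (edges : List (String × List String)) (center : String) (depth : Int) (out : List (String × List String)) : Prop := out = neighborhood_subgraph_alt edges center depth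
instance (edges : List (String × List String)) (center : String) (depth : Int) (out : List (String × List String)) : Decidable (Spec_neighborhood_subgraph edges center depth out) := by unfold Spec_neighborhood_subgraph; infer_instance

-- ===== CLAIM (what is proved, stated in full; the proofs are below) =====
def Claim_equal_neighborhood_subgraph : Prop := ∀ (edges : List (String × List String)) (center : String) (depth : Int), Dom_neighborhood_subgraph edges center depth → Spec_neighborhood_subgraph edges center depth (neighborhood_subgraph edges center depth)

-- ===== LEMMAS AND PROOFS =====

-- ---- generic set-fold algebra ----

lemma pvUpdate_subset : ∀ (t s : PySem.Set String), (∀ x ∈ t, x ∈ s) →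
    PySem.Set.update s t = s := by
  intro t
  induction t with
  | nil => intro s _; rfl
  | cons x t ih =>
    intro s h
    have : PySem.Set.add s x = s := PySem.Set.add_of_mem (h x (by simp))
    simp only [PySem.Set.update, List.foldl_cons, this]
    exact ih s (fun y hy => h y (List.mem_cons_of_mem _ hy))

lemma pvExists_update_append : ∀ (l : List String) (s : PySem.Set String),
    ∃ r, PySem.Set.update s l = s ++ r := by
  intro l
  induction l with
  | nil => intro s; exact ⟨[], by simp [PySem.Set.update]⟩
  | cons x l ih =>
    intro s
    rcases ih (PySem.Set.add s x) with ⟨r, hr⟩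
    by_cases h : x ∈ s
    · exact ⟨r, by simpa [PySem.Set.update, PySem.Set.add_of_mem h] using hr⟩
    · exact ⟨x :: r, by
        simpa [PySem.Set.update, PySem.Set.add_of_not_mem h] using hr⟩

lemma pvUpdate_update : ∀ (l t s : PySem.Set String), (∀ x ∈ t, x ∈ s) →
    PySem.Set.update s (PySem.Set.update t l) = PySem.Set.update s l := by
  intro l
  induction l with
  | nil =>
    intro t s h
    exact pvUpdate_subset t s h
  | cons x l ih =>
    intro t s h
    by_cases hx : x ∈ t
    · have e1 : PySem.Set.update t (x :: l) = PySem.Set.update t l := by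
        simp [PySem.Set.update, PySem.Set.add_of_mem hx]
      have e2 : PySem.Set.update s (x :: l) = PySem.Set.update s l := by
        simp [PySem.Set.update, PySem.Set.add_of_mem (h x hx)]
      rw [e1, e2]
      exact ih t s h
    · have e1 : PySem.Set.update t (x :: l) = PySem.Set.update (t ++ [x]) l := by
        simp [PySem.Set.update, PySem.Set.add_of_not_mem hx]
      by_cases hxs : x ∈ s
      · have e2 : PySem.Set.update s (x :: l) = PySem.Set.update s l := by
          simp [PySem.Set.update, PySem.Set.add_of_mem hxs]
        rw [e1, e2]
        exact ih (t ++ [x]) s (by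
          intro y hy
          rcases List.mem_append.1 hy with hy | hy
          · exact h y hy
          · simp at hy; subst hy; exact hxs)
      · have e2 : PySem.Set.update s (x :: l) = PySem.Set.update (s ++ [x]) l := by
          simp [PySem.Set.update, PySem.Set.add_of_not_mem hxs]
        have hsub : ∀ y ∈ t ++ [x], y ∈ s ++ [x] := by
          intro y hy
          rcases List.mem_append.1 hy with hy | hy
          · exact List.mem_append_left _ (h y hy)
          · exact List.mem_append_right _ hy
        have hIH := ih (t ++ [x]) (s ++ [x]) hsub
        rcases pvExists_update_append l (t ++ [x]) with ⟨r, hr⟩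
        have hst : PySem.Set.update s (t ++ [x]) = s ++ [x] := by
          have h1 : PySem.Set.update s t = s := pvUpdate_subset t s h
          calc PySem.Set.update s (t ++ [x])
              = PySem.Set.update (PySem.Set.update s t) [x] := PySem.Set.update_append s t [x]
            _ = PySem.Set.add s x := by rw [h1]; rfl
            _ = s ++ [x] := PySem.Set.add_of_not_mem hxs
        have hst' : PySem.Set.update (s ++ [x]) (t ++ [x]) = s ++ [x] :=
          pvUpdate_subset _ _ hsub
        rw [hr, PySem.Set.update_append (s ++ [x]) (t ++ [x]) r, hst'] at hIH
        calc PySem.Set.update s (PySem.Set.update t (x :: l))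
            = PySem.Set.update s (PySem.Set.update (t ++ [x]) l) := by rw [e1]
          _ = PySem.Set.update s ((t ++ [x]) ++ r) := by rw [hr]
          _ = PySem.Set.update (PySem.Set.update s (t ++ [x])) r :=
              PySem.Set.update_append s (t ++ [x]) r
          _ = PySem.Set.update (s ++ [x]) r := by rw [hst]
          _ = PySem.Set.update (s ++ [x]) l := hIH
          _ = PySem.Set.update s (x :: l) := e2.symm

lemma pvUpdate_ofList (l : List String) (s : PySem.Set String) :
    PySem.Set.update s (PySem.Set.ofList l) = PySem.Set.update s l := by
  have := pvUpdate_update l [] s (by intro y hy; simp at hy)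
  simpa [PySem.Set.ofList_eq_foldl, PySem.Set.update] using this

-- ---- dict lookup characterizations ----

lemma pvGetD_setdefault_nil (d : PySem.Dict String (List String)) (k n : String) :
    (d.setdefault k ([] : List String)).getD n [] = d.getD n [] := by
  by_cases h : n = k
  · subst h; exact PySem.Dict.getD_setdefault_self d n [] []
  · simp [PySem.Dict.getD, PySem.Dict.get?_setdefault_of_ne d [] h]

-- inner loop of reverse_edges: setdefault(dst, set()).add(src)
lemma pvInnerFold (src n : String) : ∀ (ts : List String) (r : PySem.Dict String (List String)),
    (ts.foldl (fun a dst =>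
        let a1 := a.setdefault dst ([] : List String)
        a1.insert dst (PySem.Set.add (a1.getD dst []) src)) r).getD n []
    = if n ∈ ts then PySem.Set.add (r.getD n []) src else r.getD n [] := by
  intro ts
  induction ts with
  | nil => intro r; simp
  | cons dst ts ih =>
    intro r
    simp only [List.foldl_cons]
    rw [ih]
    by_cases h : n = dst
    · subst h
      have hd : ((r.setdefault n ([] : List String)).insert n
          (PySem.Set.add ((r.setdefault n ([] : List String)).getD n []) src)).getD n []
          = PySem.Set.add (r.getD n []) src := by
        rw [PySem.Dict.getD_insert]
        simp [pvGetD_setdefault_nil]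
      by_cases hmem : n ∈ ts <;> simp [hmem, hd]
    · have hne : ((r.setdefault dst ([] : List String)).insert dst
          (PySem.Set.add ((r.setdefault dst ([] : List String)).getD dst []) src)).getD n []
          = r.getD n [] := by
        rw [PySem.Dict.getD_insert]
        simp [h, pvGetD_setdefault_nil]
      by_cases hmem : n ∈ ts <;> simp [hmem, h, hne]

-- outer loop of reverse_edges (with the extra setdefault(src, set()))
lemma pvOuterRev (n : String) : ∀ (es : List (String × List String)) (r : PySem.Dict String (List String)),
    (es.foldl (fun r p =>
        let r1 := r.setdefault p.1 ([] : List String)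
        p.2.foldl (fun r dst =>
          let r2 := r.setdefault dst ([] : List String)
          r2.insert dst (PySem.Set.add (r2.getD dst []) p.1)) r1) r).getD n []
    = es.foldl (fun acc p => if n ∈ p.2 then PySem.Set.add acc p.1 else acc) (r.getD n []) := by
  intro es
  induction es with
  | nil => intro r; rfl
  | cons p es ih =>
    intro r
    simp only [List.foldl_cons]
    rw [ih, pvInnerFold, pvGetD_setdefault_nil]

lemma pvCondFold (n : String) : ∀ (es : List (String × List String)) (init : PySem.Set String),
    es.foldl (fun acc p => if n ∈ p.2 then PySem.Set.add acc p.1 else acc) init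
    = PySem.Set.update init ((es.filter (fun p => decide (n ∈ p.2))).map Prod.fst) := by
  intro es
  induction es with
  | nil => intro init; rfl
  | cons p es ih =>
    intro init
    by_cases h : n ∈ p.2
    · simp [h, ih, PySem.Set.update]
    · simp [h, ih]

lemma pvRev0_getD (n : String) : ∀ (es : List (String × List String)) (r : PySem.Dict String (List String)),
    r.getD n [] = [] →
    (es.foldl (fun r p => r.insert p.1 ([] : List String)) r).getD n [] = [] := by
  intro es
  induction es with
  | nil => intro r h; exact h
  | cons p es ih =>
    intro r h
    simp only [List.foldl_cons]
    refine ih _ ?_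
    rw [PySem.Dict.getD_insert]
    split <;> simp [h]

-- B's on-demand neighbor scan equals A's fwd ∪ rev lookup, node by node
lemma pvNb_eq (edges : List (String × List String)) (n : String) :
    pvUndirNbrs edges n
    = PySem.Set.union (PySem.Set.ofList ((PySem.Dict.mk edges).getD n []))
        (PySem.Set.ofList ((pvRevEdges edges).getD n [])) := by
  have hrev : (pvRevEdges edges).getD n []
      = PySem.Set.update []
          ((edges.filter (fun p => decide (n ∈ p.2))).map Prod.fst) := by
    unfold pvRevEdges
    rw [pvOuterRev, pvCondFold]
    rw [pvRev0_getD n edges PySem.Dict.empty (by simp)]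
  have hB : pvUndirNbrs edges n
      = PySem.Set.update (PySem.Set.ofList ((PySem.Dict.mk edges).getD n []))
          ((edges.filter (fun p => decide (n ∈ p.2))).map Prod.fst) := by
    unfold pvUndirNbrs
    rw [pvCondFold]
  rw [hB, hrev]
  show _ = PySem.Set.update _ _
  rw [pvUpdate_ofList]
  exact (pvUpdate_update _ [] _ (by intro y hy; simp at hy)).symm

-- ---- BFS: queue-with-depths equals level-synchronous frontiers ----

-- B's nested expansion loops, abstracted over the neighbour function
def pvExpand (nb : String → List String) (st : PySem.Set String × List String)
    (ns : List String) : PySem.Set String × List String :=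
  ns.foldl (fun st n =>
      (nb n).foldl (fun (s : PySem.Set String × List String) t =>
        if s.1.contains t then s else (PySem.Set.add s.1 t, s.2 ++ [t])) st) st

-- one node's processing: A's fold (appending queue entries) vs B's fold (appending names)
lemma pvFoldAB (d : Int) : ∀ (l : List String) (vis : PySem.Set String)
    (q : List (String × Int)) (w : List String),
    l.foldl (fun (s : PySem.Set String × List (String × Int)) x =>
        if s.1.contains x then s else (PySem.Set.add s.1 x, s.2 ++ [(x, d)]))
      (vis, q ++ w.map (fun x => (x, d)))
    = ((l.foldl (fun (s : PySem.Set String × List String) t =>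
          if s.1.contains t then s else (PySem.Set.add s.1 t, s.2 ++ [t])) (vis, w)).1,
       q ++ ((l.foldl (fun (s : PySem.Set String × List String) t =>
          if s.1.contains t then s else (PySem.Set.add s.1 t, s.2 ++ [t])) (vis, w)).2).map
          (fun x => (x, d))) := by
  intro l
  induction l with
  | nil => intro vis q w; rfl
  | cons x l ih =>
    intro vis q w
    simp only [List.foldl_cons]
    by_cases h : PySem.Set.contains vis x = true
    · simp only [h, if_true]
      exact ih vis q w
    · have h' : PySem.Set.contains vis x = false := by simpa using h
      simp only [h', if_false, Bool.false_eq_true]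
      have := ih (PySem.Set.add vis x) q (w ++ [x])
      simpa [List.map_append, List.append_assoc] using this

-- discarding: every queue entry at depth ≥ depth is dropped
lemma pvDiscard (ed rev : PySem.Dict String (List String)) (depth : Int) :
    ∀ (q : List (String × Int)) (vis : PySem.Set String),
    (∀ e ∈ q, depth ≤ e.2) → pvLoopA ed rev depth q vis = vis := by
  intro q
  induction q with
  | nil => intro vis _; simp [pvLoopA]
  | cons e q ih =>
    intro vis h
    obtain ⟨node, d⟩ := e
    rw [pvLoopA, if_pos (h (node, d) (by simp)),
      ih vis (fun e he => h e (List.mem_cons_of_mem _ he))]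

-- one level of A's queue collapses to an expand step
lemma pvLevel (ed rev : PySem.Dict String (List String)) (depth d : Int) (hd : d < depth) :
    ∀ (cur : List String) (vis : PySem.Set String) (nxt : List String),
    pvLoopA ed rev depth (cur.map (fun x => (x, d)) ++ nxt.map (fun x => (x, d + 1))) vis
    = pvLoopA ed rev depth
        ((pvExpand (fun n => PySem.Set.union (PySem.Set.ofList (ed.getD n []))
            (PySem.Set.ofList (rev.getD n []))) (vis, nxt) cur).2.map (fun x => (x, d + 1)))
        (pvExpand (fun n => PySem.Set.union (PySem.Set.ofList (ed.getD n []))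
            (PySem.Set.ofList (rev.getD n []))) (vis, nxt) cur).1 := by
  intro cur
  induction cur with
  | nil => intro vis nxt; rfl
  | cons c cur ih =>
    intro vis nxt
    simp only [List.map_cons, List.cons_append]
    rw [pvLoopA, if_neg (not_le.2 hd)]
    simp only []
    rw [pvFoldAB (d + 1)
      (PySem.Set.union (PySem.Set.ofList (ed.getD c [])) (PySem.Set.ofList (rev.getD c [])))
      vis (cur.map (fun x => (x, d))) nxt]
    rw [ih]
    rfl

-- levels: A's queue BFS equals B's countdown over depth layers
lemma pvLevels (edges : List (String × List String)) (depth : Int) :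
    ∀ (k : Nat) (d : Int) (frontier : List String) (vis : PySem.Set String),
    k = (depth - d).toNat →
    pvLoopA ⟨edges⟩ (pvRevEdges edges) depth (frontier.map (fun x => (x, d))) vis
    = pvLoopB edges vis frontier (depth - d) := by
  intro k
  induction k using Nat.strong_induction_on with
  | _ k ih =>
    intro d frontier vis hk
    by_cases h1 : frontier = []
    · subst h1
      rw [pvLoopB, if_pos (Or.inl rfl)]
      simp [pvLoopA]
    · by_cases h2 : depth ≤ d
      · rw [pvLoopB, if_pos (Or.inr (by omega))]
        exact pvDiscard _ _ depth _ vis (by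
          intro e he
          rcases List.mem_map.1 he with ⟨x, _, hx⟩
          rw [← hx]
          exact h2)
      · have hd : d < depth := not_le.1 h2
        rw [pvLoopB, if_neg (by simp only [not_or, not_le]; exact ⟨h1, by omega⟩)]
        simp only []
        have hmapnil : (frontier.map (fun x => (x, d))) =
            frontier.map (fun x => (x, d)) ++ ([] : List String).map (fun x => (x, d + 1)) := by
          simp
        rw [hmapnil, pvLevel ⟨edges⟩ (pvRevEdges edges) depth d hd frontier vis []]
        have hEx : frontier.foldl (fun (s : PySem.Set String × List String) n =>
              (pvUndirNbrs edges n).foldl (fun (s : PySem.Set String × List String) t =>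
                if s.1.contains t then s else (PySem.Set.add s.1 t, s.2 ++ [t])) s) (vis, [])
            = pvExpand (fun n => PySem.Set.union
                (PySem.Set.ofList ((⟨edges⟩ : PySem.Dict String (List String)).getD n []))
                (PySem.Set.ofList ((pvRevEdges edges).getD n []))) (vis, []) frontier := by
          show pvExpand (fun n => pvUndirNbrs edges n) (vis, []) frontier = _
          rw [funext (fun n => pvNb_eq edges n)]
        rw [← hEx]
        have hstep : depth - d - 1 = depth - (d + 1) := by omega
        rw [hstep]
        exact ih ((depth - (d + 1)).toNat) (by omega) (d + 1) _ _ rfl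

-- ---- final dict: filtering comprehension vs intersection ----

lemma pvAdd_filter (p : String → Bool) (s : PySem.Set String) (x : String) :
    (PySem.Set.add s x).filter p
    = if p x then PySem.Set.add (s.filter p) x else s.filter p := by
  by_cases hm : x ∈ s
  · have hmf : p x = true → x ∈ s.filter p := fun hp => List.mem_filter.2 ⟨hm, hp⟩
    rw [PySem.Set.add_of_mem hm]
    by_cases hp : p x = true
    · rw [if_pos hp, PySem.Set.add_of_mem (hmf hp)]
    · rw [if_neg hp]
  · rw [PySem.Set.add_of_not_mem hm, List.filter_append]
    by_cases hp : p x = true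
    · rw [if_pos hp]
      have : x ∉ s.filter p := fun hc => hm (List.mem_filter.1 hc).1
      rw [PySem.Set.add_of_not_mem this]
      simp [hp]
    · rw [if_neg hp]
      simp [hp]

lemma pvOfList_filter (p : String → Bool) : ∀ (l : List String) (s : PySem.Set String),
    (l.foldl PySem.Set.add s).filter p = (l.filter p).foldl PySem.Set.add (s.filter p) := by
  intro l
  induction l with
  | nil => intro s; rfl
  | cons x l ih =>
    intro s
    simp only [List.foldl_cons, List.filter_cons]
    rw [ih, pvAdd_filter]
    by_cases hp : p x = true <;> simp [hp]

-- A's comprehension value equals B's intersection value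
lemma pvVal_eq (visited : PySem.Set String) (l : List String) :
    PySem.Set.ofList (l.filter (fun t => PySem.Set.contains visited t))
    = PySem.Set.inter (PySem.Set.ofList l) visited := by
  show _ = (PySem.Set.ofList l).filter (fun t => PySem.Set.contains visited t)
  rw [PySem.Set.ofList_eq_foldl, PySem.Set.ofList_eq_foldl,
    pvOfList_filter (fun t => PySem.Set.contains visited t) l []]
  rfl

theorem pv_main : ∀ (edges : List (String × List String)) (center : String) (depth : Int),
    neighborhood_subgraph edges center depth = neighborhood_subgraph_alt edges center depth := by
  intro edges center depth
  simp only [neighborhood_subgraph, neighborhood_subgraph_alt]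
  have hvis : pvLoopA ⟨edges⟩ (pvRevEdges edges) depth [(center, 0)] [center]
      = pvLoopB edges [center] [center] depth := by
    have := pvLevels edges depth (depth - 0).toNat 0 [center] [center] rfl
    simpa using this
  rw [hvis]
  refine congrArg PySem.Dict.items ?_
  refine PySem.List.foldl_congr_mem _ _ _ _ ?_
  intro acc n _
  rw [pvVal_eq]

-- ===== VERDICT (by name: the statement is the Claim_ definition above) =====
theorem neighborhood_subgraph_spec : Claim_equal_neighborhood_subgraph := by
  intro edges center depth _
  exact pv_main edges center depth
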